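-- pv_equiv track=rewrite | github.com/hubbm-bbm101/lab5-exercise-solution-b2210765023 | b2210765023/Exercise2.py | emailcheck
-- ===== SOURCE A (Python) =====
-- def emailcheck(email):
--     x = 0
--     for chr in email:
--         if chr == "@":
--             x += 1
--         if chr == ".":
--             x += 1
--         if x == 2:
--             return True
-- ===== SOURCE B (Python) =====
-- def emailcheck(email):
--     if email.count("@") + email.count(".") >= 2:
--         return True
-- ===== Notes on version B (the rewrite author's own statement) =====
-- stated objective: simpler
-- what changed: Replaces the early-exit accumulator loop with two whole-string count() passes and a single threshold test, keeping the True-or-None return.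
import Mathlib
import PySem

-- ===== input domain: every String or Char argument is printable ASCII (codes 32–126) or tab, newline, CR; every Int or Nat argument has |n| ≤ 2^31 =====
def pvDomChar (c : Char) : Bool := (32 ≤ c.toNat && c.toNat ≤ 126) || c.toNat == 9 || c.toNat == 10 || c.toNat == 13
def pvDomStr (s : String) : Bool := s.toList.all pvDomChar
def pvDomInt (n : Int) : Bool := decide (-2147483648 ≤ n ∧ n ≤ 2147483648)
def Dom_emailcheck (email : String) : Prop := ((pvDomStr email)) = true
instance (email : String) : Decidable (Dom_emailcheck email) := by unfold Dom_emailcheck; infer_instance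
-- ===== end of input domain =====

-- B replaces A's early-exit accumulator loop with two count() passes and a threshold test (simpler).

-- ===== PORT A =====
-- loop over the characters, incrementing x and returning True as soon as x == 2
def emailcheckLoop : List Char → Int → Option Bool
  | [], _ => none
  | c :: cs, x =>
    let x1 := if c = '@' then x + 1 else x
    let x2 := if c = '.' then x1 + 1 else x1
    if x2 = 2 then some true else emailcheckLoop cs x2

def emailcheck (email : String) : Option Bool :=
  emailcheckLoop email.toList 0

-- ===== PORT B =====
def emailcheck_alt (email : String) : Option Bool :=
  if 2 ≤ PySem.Str.count email "@" + PySem.Str.count email "." then some true else none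

-- ===== PRECONDITION & SPEC =====
def Spec_emailcheck (email : String) (out : Option Bool) : Prop := out = emailcheck_alt email
instance (email : String) (out : Option Bool) : Decidable (Spec_emailcheck email out) := by unfold Spec_emailcheck; infer_instance

-- ===== CLAIM (what is proved, stated in full; the proofs are below) =====
def Claim_equal_emailcheck : Prop := ∀ (email : String), Dom_emailcheck email → Spec_emailcheck email (emailcheck email)

-- ===== LEMMAS AND PROOFS =====

-- str.count with a one-character pattern counts that character
lemma count_go_singleton (c : Char) (l : List Char) : ∀ (fuel acc : Nat),
    l.length ≤ fuel → PySem.Chars.count.go [c] fuel l acc = acc + l.count c := by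
  induction l with
  | nil => intro fuel acc _; cases fuel <;> simp [PySem.Chars.count.go]
  | cons d t ih =>
    intro fuel acc h
    cases fuel with
    | zero => simp at h
    | succ n =>
      have ht : t.length ≤ n := by simpa using h
      by_cases hd : c = d
      · subst hd
        simp [PySem.Chars.count.go, List.isPrefixOf, ih n (acc + 1) ht]
        omega
      · simp [PySem.Chars.count.go, List.isPrefixOf, hd, ih n acc ht, Ne.symm hd]

lemma chars_count_singleton (s : List Char) (c : Char) :
    PySem.Chars.count s [c] = s.count c := by
  simp [PySem.Chars.count, count_go_singleton c s s.length 0 le_rfl]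

-- A's loop on a running total x ∈ {0,1} returns True iff x plus the remaining counts reaches 2
lemma emailcheckLoop_eq (l : List Char) : ∀ (x : Int), x = 0 ∨ x = 1 →
    emailcheckLoop l x =
      if 2 ≤ x + l.count '@' + l.count '.' then some true else none := by
  induction l with
  | nil => intro x hx; simp [emailcheckLoop]; omega
  | cons c cs ih =>
    intro x hx
    rcases hx with rfl | rfl <;> by_cases h1 : c = '@' <;> by_cases h2 : c = '.' <;>
      simp [emailcheckLoop, h1, h2, ih 0 (Or.inl rfl), ih 1 (Or.inr rfl)] <;>
      (try split_ifs) <;> simp_all <;> omega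

-- ===== VERDICT (by name: the statement is the Claim_ definition above) =====
theorem emailcheck_spec : Claim_equal_emailcheck := by
  intro email _
  unfold Spec_emailcheck emailcheck emailcheck_alt
  have hAt : PySem.Str.count email "@" = email.toList.count '@' := by
    rw [PySem.Str.count_eq]; exact chars_count_singleton _ _
  have hDot : PySem.Str.count email "." = email.toList.count '.' := by
    rw [PySem.Str.count_eq]; exact chars_count_singleton _ _
  rw [emailcheckLoop_eq email.toList 0 (Or.inl rfl), hAt, hDot]
  split_ifs <;> first | rfl | (exfalso; omega)
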